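-- pv_equiv track=rewrite | github.com/AsadbekKazakovDev/list_search | find05_max_even.py | find_max_even
-- ===== SOURCE A (Python) =====
-- def find_max_even(data):
--     """
--     Given the list of numbers, Find the maximum even number in the list
--     args:
--         data: list of numbers
--     returns: maximum even number in the list
--     """
--     i=0
--     lst = []
--     y=0
--     while y<=len(data)-1:
--         if data[y]%2==0:
--             lst.append(data[y])
--         y+=1
--     ans = lst[0]
--     while i<=len(lst)-1:
--         if ans<lst[i]:
--             ans = lst[i]
--         i+=1
--     return ans
-- ===== SOURCE B (Python) =====
-- def find_max_even(data):
--     evens = sorted(x for x in data if x % 2 == 0)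
--     return evens[-1]
-- ===== Notes on version B (the rewrite author's own statement) =====
-- stated objective: alternative
-- what changed: Replaces the two index-driven while loops (build an evens list, then linear max-scan) with a filter-then-sort: the sorted evens list's last element is the maximum.
import Mathlib
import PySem

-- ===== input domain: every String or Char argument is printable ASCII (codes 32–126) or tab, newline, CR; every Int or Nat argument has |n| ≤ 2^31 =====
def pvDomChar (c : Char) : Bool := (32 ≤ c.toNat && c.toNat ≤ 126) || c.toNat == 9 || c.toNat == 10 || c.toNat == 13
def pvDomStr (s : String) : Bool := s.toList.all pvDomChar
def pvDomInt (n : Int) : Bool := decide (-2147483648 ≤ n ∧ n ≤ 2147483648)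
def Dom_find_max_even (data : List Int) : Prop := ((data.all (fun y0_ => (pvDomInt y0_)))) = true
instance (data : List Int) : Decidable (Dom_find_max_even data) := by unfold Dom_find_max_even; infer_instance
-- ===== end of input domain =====

-- B replaces A's two index-driven while loops by filter-then-sort (last of sorted evens); alternative decomposition, not faster.

-- ===== PORT A =====
def find_max_even (data : List Int) : Int :=
  let lst := (PySem.List.pyRange 0 data.length 1).foldl
    (fun lst y => if PySem.Int.mod (PySem.List.pyGetD data y 0) 2 = 0
                  then lst ++ [PySem.List.pyGetD data y 0] else lst) []
  let ans := (PySem.List.pyGet? lst 0).getD 0   -- lst[0]; Pre_ guarantees lst ≠ []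
  (PySem.List.pyRange 0 lst.length 1).foldl
    (fun ans i => if ans < PySem.List.pyGetD lst i 0 then PySem.List.pyGetD lst i 0 else ans) ans

-- ===== PORT B =====
def find_max_even_alt (data : List Int) : Int :=
  let evens := PySem.List.sorted (data.filter (fun x => PySem.Int.mod x 2 = 0)) (fun x => x) false
  (PySem.List.pyGet? evens (-1)).getD 0   -- evens[-1]; Pre_ guarantees evens ≠ []

-- ===== PRECONDITION & SPEC =====
-- Pre_ excludes exactly the inputs with no even element, where both A and B raise IndexError.
def Pre_find_max_even (data : List Int) : Prop := ∃ x ∈ data, PySem.Int.mod x 2 = 0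
instance (data : List Int) : Decidable (Pre_find_max_even data) := by unfold Pre_find_max_even; infer_instance
def pvWitness_find_max_even : List Int := [3, 4, 5, 8, 2]

def Spec_find_max_even (data : List Int) (out : Int) : Prop := out = find_max_even_alt data
instance (data : List Int) (out : Int) : Decidable (Spec_find_max_even data out) := by unfold Spec_find_max_even; infer_instance

-- ===== CLAIM (what is proved, stated in full; the proofs are below) =====
def Claim_equal_find_max_even : Prop := ∀ (data : List Int), Dom_find_max_even data → Pre_find_max_even data → Spec_find_max_even data (find_max_even data)

-- ===== LEMMAS AND PROOFS =====

-- In a ≤-pairwise list, the last element bounds every member.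
theorem pv_getLast_ub (l : List Int) (h : l.Pairwise (· ≤ ·)) (hne : l ≠ []) :
    ∀ x ∈ l, x ≤ l.getLast hne := by
  induction l with
  | nil => simp at hne
  | cons a t ih =>
    intro x hx
    rcases List.pairwise_cons.mp h with ⟨ha, ht⟩
    cases t with
    | nil =>
      have hxa : x = a := by simpa using hx
      simp [hxa]
    | cons b u =>
      rcases List.mem_cons.mp hx with rfl | hx
      · exact le_trans (ha b (by simp)) (ih ht (by simp) b (by simp))
      · exact ih ht (by simp) x hx

theorem find_max_even_eq (data : List Int) (hpre : Pre_find_max_even data) :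
    find_max_even data = find_max_even_alt data := by
  set E := data.filter (fun x => PySem.Int.mod x 2 = 0) with hE
  have hEne : E ≠ [] := by
    rcases hpre with ⟨x, hx, hm⟩
    intro h
    have : x ∈ E := by
      rw [hE]
      exact List.mem_filter.mpr ⟨hx, by simpa using (PySem.Int.mod_eq_zero_iff_dvd x 2).mp hm⟩
    simp [h] at this
  -- A's value
  have hA : find_max_even data = E.foldl max (E.getD 0 0) := by
    have h1 := PySem.List.foldl_pyRange_pyGetD (xs := data) (d := 0) (init := ([] : List Int)) (a := 0)
        (f := fun acc v => if PySem.Int.mod v 2 = 0 then acc ++ [v] else acc) (by simp)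
    show (let lst := (PySem.List.pyRange 0 data.length 1).foldl
            (fun lst y => if PySem.Int.mod (PySem.List.pyGetD data y 0) 2 = 0
                          then lst ++ [PySem.List.pyGetD data y 0] else lst) []
          let ans := (PySem.List.pyGet? lst 0).getD 0
          (PySem.List.pyRange 0 lst.length 1).foldl
            (fun ans i => if ans < PySem.List.pyGetD lst i 0 then PySem.List.pyGetD lst i 0 else ans) ans)
      = E.foldl max (E.getD 0 0)
    simp only [show ((data.length : Int)) = PySem.List.len data from rfl]
    rw [h1, PySem.List.foldl_append_ite_eq_filter]
    simp only [Int.toNat_zero, List.drop_zero, List.nil_append, ← hE]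
    have h2 := PySem.List.foldl_pyRange_pyGetD (xs := E) (d := 0)
        (init := (PySem.List.pyGet? E 0).getD 0) (a := 0)
        (f := fun ans v => if ans < v then v else ans) (by simp)
    simp only [show ((E.length : Int)) = PySem.List.len E from rfl]
    rw [h2]
    simp only [Int.toNat_zero, List.drop_zero, PySem.List.pyGet?_zero]
    have : ∀ (l : List Int) (a : Int),
        l.foldl (fun ans x => if ans < x then x else ans) a = l.foldl max a := by
      intro l
      induction l with
      | nil => intro a; rfl
      | cons b t ih =>
        intro a
        simp only [List.foldl_cons, ih]
        congr 1
        by_cases h : a < b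
        · simp [h, max_eq_right h.le]
        · simp [h, max_eq_left (not_lt.mp h)]
    rw [this]
    congr 1
  -- B's value
  set S := PySem.List.sorted E (fun x => x) false with hS
  have hSne : S ≠ [] := by
    simp [hS, PySem.List.sorted_eq_nil_iff, hEne]
  have hB : find_max_even_alt data = S.getLast hSne := by
    unfold find_max_even_alt
    simp only [← hE, ← hS, PySem.List.pyGet?_neg_one, List.getLast?_eq_getLast_of_ne_nil hSne,
      Option.getD_some]
  rw [hA, hB]
  -- both sides are the maximum of E
  have hperm : S.Perm E := PySem.List.sorted_perm _ _ _
  have hpw : S.Pairwise (· ≤ ·) := PySem.List.sorted_pairwise E (fun x => x)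
  have hlast_mem : S.getLast hSne ∈ E := hperm.mem_iff.mp (List.getLast_mem hSne)
  have hlast_ub : ∀ x ∈ E, x ≤ S.getLast hSne := by
    intro x hx
    exact pv_getLast_ub S hpw hSne x (hperm.mem_iff.mpr hx)
  have hfold := PySem.List.le_foldl_max E (E.getD 0 0)
  have hhead_mem : E.getD 0 0 ∈ E := by
    obtain ⟨a, t, hcons⟩ := List.exists_cons_of_ne_nil hEne
    rw [hcons]; simp
  have hfold_mem : E.foldl max (E.getD 0 0) ∈ E := by
    rcases PySem.List.foldl_max_mem E (E.getD 0 0) with h | h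
    · rw [h]; exact hhead_mem
    · exact h
  exact le_antisymm (hlast_ub _ hfold_mem)
    (le_trans (le_refl _) (hfold.2 _ hlast_mem))

-- ===== VERDICT (by name: the statement is the Claim_ definition above) =====
theorem find_max_even_spec : Claim_equal_find_max_even := by
  intro data _ hpre
  unfold Spec_find_max_even
  exact find_max_even_eq data hpre
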